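-- pv_equiv track=rewrite | github.com/ysouati/Cs846-Project | src/pipeline/extract_rq1_features.py | check_independent_ci_fix
-- ===== SOURCE A (Python) =====
-- def check_independent_ci_fix(timeline_commits: list, statuses: dict, pr_agent: str) -> bool:
--     """Checks if the agent independently fixed a failing CI pipeline.
--
--     A fix is valid if an earlier commit had a FAILURE/ERROR state,
--     and a subsequent commit by the agent results in a SUCCESS state.
--     """
--     if not timeline_commits:
--         return False
--
--     had_failure = False
--
--     for commit in timeline_commits:
--         sha = commit.get("sha")
--         state = statuses.get(sha, "NONE")
--
--         if state in ("FAILURE", "ERROR"):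
--             had_failure = True
--         elif state == "SUCCESS" and had_failure:
--             # The pipeline failed previously, but is now passing.
--             return True
--
--     return False
-- ===== SOURCE B (Python) =====
-- def check_independent_ci_fix(timeline_commits: list, statuses: dict, pr_agent: str) -> bool:
--     """Locate-then-scan: find the first FAILURE/ERROR state, then look for a later SUCCESS."""
--     states = [statuses.get(c.get("sha"), "NONE") for c in timeline_commits]
--     first_fail = next((i for i, s in enumerate(states) if s in ("FAILURE", "ERROR")), None)
--     if first_fail is None:
--         return False
--     return any(s == "SUCCESS" for s in states[first_fail + 1:])
-- ===== Notes on version B (the rewrite author's own statement) =====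
-- stated objective: alternative
-- what changed: Replaces the single stateful had_failure loop with a stateless locate-then-scan decomposition: map commits to states, find the index of the first FAILURE/ERROR, then check for any SUCCESS in the tail after it.
import Mathlib
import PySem

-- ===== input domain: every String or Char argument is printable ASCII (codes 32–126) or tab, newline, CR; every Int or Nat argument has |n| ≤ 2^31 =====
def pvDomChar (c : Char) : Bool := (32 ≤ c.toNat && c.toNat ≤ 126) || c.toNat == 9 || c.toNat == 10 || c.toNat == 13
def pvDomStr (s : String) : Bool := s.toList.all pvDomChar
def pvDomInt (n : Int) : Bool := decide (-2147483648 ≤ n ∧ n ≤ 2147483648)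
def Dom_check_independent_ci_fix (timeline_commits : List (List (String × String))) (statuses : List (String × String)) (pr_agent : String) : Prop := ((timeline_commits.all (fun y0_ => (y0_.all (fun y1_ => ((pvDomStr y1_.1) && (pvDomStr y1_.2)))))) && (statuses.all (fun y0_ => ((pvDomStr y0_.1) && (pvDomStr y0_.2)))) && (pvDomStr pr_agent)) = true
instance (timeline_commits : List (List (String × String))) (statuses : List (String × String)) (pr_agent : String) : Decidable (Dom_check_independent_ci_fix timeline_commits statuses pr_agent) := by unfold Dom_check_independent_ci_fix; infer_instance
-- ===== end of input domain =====

-- B replaces A's stateful had_failure loop by a stateless locate-then-scan decomposition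
-- (map to states, find first FAILURE/ERROR index, look for SUCCESS in the tail); objective: alternative.

-- ===== PORT A =====
-- state = statuses.get(commit.get("sha"), "NONE"); a missing "sha" key never matches a String key
def pvStateOf (statuses : List (String × String)) (commit : List (String × String)) : String :=
  match commit.lookup "sha" with
  | some sha => ((statuses.lookup sha).getD "NONE")
  | none => "NONE"

-- the for-loop of A with its had_failure flag and early return
def pvLoopA (statuses : List (String × String)) : List (List (String × String)) → Bool → Bool
  | [], _ => false
  | commit :: rest, had_failure =>
    let state := pvStateOf statuses commit
    if state = "FAILURE" ∨ state = "ERROR" then pvLoopA statuses rest true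
    else if state = "SUCCESS" ∧ had_failure = true then true
    else pvLoopA statuses rest had_failure

def check_independent_ci_fix (timeline_commits : List (List (String × String))) (statuses : List (String × String)) (pr_agent : String) : Bool :=
  if timeline_commits = [] then false
  else pvLoopA statuses timeline_commits false

-- ===== PORT B =====
def check_independent_ci_fix_alt (timeline_commits : List (List (String × String))) (statuses : List (String × String)) (pr_agent : String) : Bool :=
  let states := timeline_commits.map (fun c =>
    match c.lookup "sha" with
    | some sha => ((statuses.lookup sha).getD "NONE")
    | none => "NONE")
  match states.findIdx? (fun s => s == "FAILURE" || s == "ERROR") with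
  | none => false
  | some first_fail => (states.drop (first_fail + 1)).any (fun s => s == "SUCCESS")

-- ===== PRECONDITION & SPEC =====
def Spec_check_independent_ci_fix (timeline_commits : List (List (String × String))) (statuses : List (String × String)) (pr_agent : String) (out : Bool) : Prop := out = check_independent_ci_fix_alt timeline_commits statuses pr_agent
instance (timeline_commits : List (List (String × String))) (statuses : List (String × String)) (pr_agent : String) (out : Bool) : Decidable (Spec_check_independent_ci_fix timeline_commits statuses pr_agent out) := by unfold Spec_check_independent_ci_fix; infer_instance

-- ===== CLAIM (what is proved, stated in full; the proofs are below) =====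
def Claim_equal_check_independent_ci_fix : Prop := ∀ (timeline_commits : List (List (String × String))) (statuses : List (String × String)) (pr_agent : String), Dom_check_independent_ci_fix timeline_commits statuses pr_agent → Spec_check_independent_ci_fix timeline_commits statuses pr_agent (check_independent_ci_fix timeline_commits statuses pr_agent)

-- ===== LEMMAS AND PROOFS =====

-- once had_failure is true, A's loop returns true iff some remaining state is SUCCESS
lemma pvLoopA_true (statuses : List (String × String)) (l : List (List (String × String))) :
    pvLoopA statuses l true = (l.map (pvStateOf statuses)).any (fun s => s == "SUCCESS") := by
  induction l with
  | nil => simp [pvLoopA]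
  | cons c rest ih =>
    simp only [pvLoopA, List.map_cons, List.any_cons]
    by_cases hf : pvStateOf statuses c = "FAILURE" ∨ pvStateOf statuses c = "ERROR"
    · rw [if_pos hf, ih]
      rcases hf with h | h <;> simp [h]
    · rw [if_neg hf]
      by_cases hs : pvStateOf statuses c = "SUCCESS"
      · simp [hs]
      · simp [hs, ih]

-- with had_failure false, A's loop computes B's locate-then-scan over the state list
lemma pvLoopA_false (statuses : List (String × String)) (l : List (List (String × String))) :
    pvLoopA statuses l false =
      (match (l.map (pvStateOf statuses)).findIdx? (fun s => s == "FAILURE" || s == "ERROR") with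
       | none => false
       | some i => ((l.map (pvStateOf statuses)).drop (i + 1)).any (fun s => s == "SUCCESS")) := by
  induction l with
  | nil => simp [pvLoopA]
  | cons c rest ih =>
    simp only [pvLoopA, List.map_cons, List.findIdx?_cons]
    by_cases hf : pvStateOf statuses c = "FAILURE" ∨ pvStateOf statuses c = "ERROR"
    · rw [if_pos hf, pvLoopA_true]
      rcases hf with h | h <;> simp [h]
    · rw [if_neg hf]
      have hfb : (pvStateOf statuses c == "FAILURE" || pvStateOf statuses c == "ERROR") = false := by
        push Not at hf; simp [hf.1, hf.2]
      rw [hfb]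
      simp only [if_neg Bool.false_ne_true]
      by_cases hs : pvStateOf statuses c = "SUCCESS"
      · rw [if_neg (by simp [hs])]
        rw [ih]
        cases h : (rest.map (pvStateOf statuses)).findIdx? (fun s => s == "FAILURE" || s == "ERROR") with
        | none => simp
        | some i => simp [List.drop_succ_cons]
      · rw [if_neg (by simp [hs])]
        rw [ih]
        cases h : (rest.map (pvStateOf statuses)).findIdx? (fun s => s == "FAILURE" || s == "ERROR") with
        | none => simp
        | some i => simp [List.drop_succ_cons]

-- ===== VERDICT (by name: the statement is the Claim_ definition above) =====
theorem check_independent_ci_fix_spec : Claim_equal_check_independent_ci_fix := by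
  intro tc st pr _
  unfold Spec_check_independent_ci_fix check_independent_ci_fix check_independent_ci_fix_alt
  cases tc with
  | nil => simp
  | cons c rest =>
    rw [if_neg (by simp)]
    exact pvLoopA_false st (c :: rest)
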